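-- pv_equiv track=rewrite | github.com/Abdulkerim0966/a2sv | wee9/leetcode/minimum-moves-to-reach-target-score.py | minMoves
-- ===== SOURCE A (Python) =====
-- def minMoves(target: int, maxDoubles: int) -> int:
--     mo=0
--     while maxDoubles >0 and target > 1:
--         if target%2==1:
--             mo+=1
--             target-=1
--         else:
--             mo+=1
--             target //=2
--             maxDoubles-=1
--     if target>1:
--         mo+=(target-1)
--     return mo
-- ===== SOURCE B (Python) =====
-- def minMoves(target: int, maxDoubles: int) -> int:
--     if target <= 1:
--         return 0
--     L = target.bit_length() - 1
--     d = min(max(maxDoubles, 0), L)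
--     low = target & ((1 << d) - 1)
--     return d + low.bit_count() + (target >> d) - 1
-- ===== Notes on version B (the rewrite author's own statement) =====
-- stated objective: faster
-- what changed: Replaces the step-by-step greedy loop (one +1/halving per iteration) with a closed form read off target's binary representation: d = min(max(maxDoubles,0), bit_length-1) halvings, popcount of the low d bits decrements, and (target>>d)-1 final increments.
import Mathlib
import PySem

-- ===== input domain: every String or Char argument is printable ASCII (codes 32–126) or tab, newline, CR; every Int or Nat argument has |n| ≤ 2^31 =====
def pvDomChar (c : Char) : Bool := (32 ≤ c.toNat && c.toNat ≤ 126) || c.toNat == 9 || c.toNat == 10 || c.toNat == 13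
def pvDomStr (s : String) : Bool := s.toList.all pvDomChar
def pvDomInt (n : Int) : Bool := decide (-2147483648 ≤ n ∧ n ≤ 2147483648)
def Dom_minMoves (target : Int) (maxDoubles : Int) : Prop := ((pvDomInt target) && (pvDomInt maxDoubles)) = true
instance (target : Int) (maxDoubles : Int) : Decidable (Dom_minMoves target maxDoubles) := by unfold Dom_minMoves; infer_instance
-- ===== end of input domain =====

-- B replaces A's one-operation-per-iteration greedy loop by a closed form read off target's binary representation.

-- ===== PORT A =====
-- A's while-loop as recursion on the (strictly decreasing) target; the post-loop
-- `if target>1: mo += target-1` is the exit branch of the recursion.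
def minMovesLoop (target : Int) (maxDoubles : Int) (mo : Int) : Int :=
  if h : maxDoubles > 0 ∧ target > 1 then
    if PySem.Int.mod target 2 = 1 then
      minMovesLoop (target - 1) maxDoubles (mo + 1)
    else
      minMovesLoop (PySem.Int.floordiv target 2) (maxDoubles - 1) (mo + 1)
  else
    if target > 1 then mo + (target - 1) else mo
termination_by target.toNat
decreasing_by
  · omega
  · rw [PySem.Int.floordiv_eq_ediv_of_pos (by omega)]; omega

def minMoves (target : Int) (maxDoubles : Int) : Int :=
  minMovesLoop target maxDoubles 0

-- ===== PORT B =====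
-- Source B, step for step: bit_length/&/bit_count/>> are PySem.Int.bitLength, band,
-- bitCount and Lean's >>> (exact for Python per PySem).  The shift amount d is a
-- Nat because Lean shifts take a Nat; min(max(maxDoubles,0),L) is ≥ 0, so .toNat
-- loses nothing.
def minMoves_alt (target : Int) (maxDoubles : Int) : Int :=
  if target ≤ 1 then 0
  else
    let L : Int := (PySem.Int.bitLength target : Int) - 1
    let d : Nat := (min (max maxDoubles 0) L).toNat
    let low : Int := PySem.Int.band target ((1 <<< d) - 1)
    (d : Int) + (PySem.Int.bitCount low : Int) + (target >>> d) - 1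

-- ===== PRECONDITION & SPEC =====
def Spec_minMoves (target : Int) (maxDoubles : Int) (out : Int) : Prop := out = minMoves_alt target maxDoubles
instance (target : Int) (maxDoubles : Int) (out : Int) : Decidable (Spec_minMoves target maxDoubles out) := by unfold Spec_minMoves; infer_instance

-- ===== CLAIM (what is proved, stated in full; the proofs are below) =====
def Claim_equal_minMoves : Prop := ∀ (target : Int) (maxDoubles : Int), Dom_minMoves target maxDoubles → Spec_minMoves target maxDoubles (minMoves target maxDoubles)

-- ===== LEMMAS AND PROOFS =====

-- abbreviation for the closed form over Nat, used by the induction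
def g (n : Nat) (m : Int) : Int :=
  if n ≤ 1 then 0
  else
    let d := min (max m 0).toNat (Nat.log2 n)
    (d : Int) + (PySem.Int.bitCount ((n % 2 ^ d : Nat) : Int) : Int) + ((n / 2 ^ d : Nat) : Int) - 1

lemma bc_odd (x : Nat) (hx : x % 2 = 1) :
    PySem.Int.bitCount (x : Int) = PySem.Int.bitCount ((x - 1 : Nat) : Int) + 1 := by
  rw [PySem.Int.bitCount_natCast (by omega : 0 < x)]
  by_cases h1 : x = 1
  · subst h1; decide
  · rw [PySem.Int.bitCount_natCast (by omega : 0 < x - 1)]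
    have h2 : (x - 1) / 2 = x / 2 := by omega
    rw [h2]
    omega

lemma bc_even (x : Nat) (hx : x % 2 = 0) :
    PySem.Int.bitCount ((x / 2 : Nat) : Int) = PySem.Int.bitCount (x : Int) := by
  by_cases h0 : x = 0
  · subst h0; decide
  · rw [PySem.Int.bitCount_natCast (by omega : 0 < x)]
    omega

lemma log2_eq (n l : Nat) (h1 : 2 ^ l ≤ n) (h2 : n < 2 ^ (l + 1)) : Nat.log2 n = l := by
  rw [Nat.log2_eq_log_two]
  exact Nat.log_eq_of_pow_le_of_lt_pow h1 h2

lemma log2_pos (n : Nat) (h : 2 ≤ n) : 1 ≤ Nat.log2 n :=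
  (Nat.le_log2 (by omega)).mpr (by omega)

lemma log2_pred_odd (n : Nat) (h3 : 3 ≤ n) (hodd : n % 2 = 1) : Nat.log2 (n - 1) = Nat.log2 n := by
  have h1 : 2 ^ Nat.log2 n ≤ n := Nat.log2_self_le (by omega)
  have h2 : n < 2 ^ (Nat.log2 n + 1) := Nat.lt_log2_self
  have hl1 : 1 ≤ Nat.log2 n := log2_pos n (by omega)
  have hne : n ≠ 2 ^ Nat.log2 n := by
    intro he
    have : (2:Nat) ∣ 2 ^ Nat.log2 n := dvd_pow_self 2 (by omega)
    omega
  exact log2_eq (n - 1) (Nat.log2 n) (by omega) (by omega)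

lemma log2_half (n : Nat) (_h : 2 ≤ n) : Nat.log2 (n / 2) = Nat.log2 n - 1 := by
  rw [Nat.log2_eq_log_two, Nat.log2_eq_log_two, Nat.log_div_base]

lemma sub_one_div_eq (n p : Nat) (hp : 0 < p) (hr : 1 ≤ n % p) : (n - 1) / p = n / p := by
  have h := Nat.div_add_mod n p
  have hm : n % p < p := Nat.mod_lt _ hp
  apply Nat.div_eq_of_lt_le
  · have : n / p * p = p * (n / p) := Nat.mul_comm _ _
    omega
  · have : (n / p + 1) * p = p * (n / p) + p := by ring
    omega

lemma sub_one_mod_eq (n p : Nat) (hp : 0 < p) (hr : 1 ≤ n % p) : (n - 1) % p = n % p - 1 := by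
  have h := Nat.div_add_mod n p
  have h2 := Nat.div_add_mod (n - 1) p
  have h3 := sub_one_div_eq n p hp hr
  rw [h3] at h2
  omega

-- accumulator lemma for A's loop
lemma minMovesLoop_acc (n : Nat) : ∀ (target maxDoubles mo : Int), target.toNat = n →
    minMovesLoop target maxDoubles mo = mo + minMovesLoop target maxDoubles 0 := by
  induction n using Nat.strong_induction_on with
  | _ n ih =>
    intro target maxDoubles mo hn
    conv_lhs => rw [minMovesLoop]
    conv_rhs => rw [minMovesLoop]
    split
    · 
      have hfd : PySem.Int.floordiv target 2 = target / 2 :=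
        PySem.Int.floordiv_eq_ediv_of_pos (by omega)
      split
      · rw [ih (target - 1).toNat (by omega) _ _ _ rfl,
            ih (target - 1).toNat (by omega) _ _ (0 + 1) rfl]
        omega
      · rw [hfd, ih (target / 2).toNat (by omega) _ _ _ rfl,
            ih (target / 2).toNat (by omega) _ _ (0 + 1) rfl]
        omega
    · split <;> omega

-- the main induction: A's loop started at mo = 0 computes the closed form
lemma loop_eq_g (n : Nat) : ∀ (target maxDoubles : Int), target.toNat = n → 0 ≤ target →
    minMovesLoop target maxDoubles 0 = g n maxDoubles := by
  induction n using Nat.strong_induction_on with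
  | _ n ih =>
    intro target maxDoubles hn hpos
    rw [minMovesLoop]
    by_cases ht : target > 1
    · have hn2 : 2 ≤ n := by omega
      by_cases hm : maxDoubles > 0
      · -- a double is available; d ≥ 1
        have hlog : 1 ≤ Nat.log2 n := log2_pos n hn2
        set l := Nat.log2 n with hl
        set d := min (max maxDoubles 0).toNat l with hdd
        have hd1 : 1 ≤ d := by omega
        have hpow : 0 < 2 ^ d := Nat.two_pow_pos d
        have hx2 : n % 2 ^ d % 2 = n % 2 := Nat.mod_mod_of_dvd n (dvd_pow_self 2 (by omega))
        simp only [hm, ht, and_self, dite_true]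
        have hmod : PySem.Int.mod target 2 = target % 2 :=
          PySem.Int.mod_eq_emod_of_pos (by omega)
        by_cases hodd : target % 2 = 1
        · -- odd step: target -= 1
          have hnodd : n % 2 = 1 := by omega
          have hn3 : 3 ≤ n := by omega
          rw [hmod, if_pos hodd, minMovesLoop_acc (target - 1).toNat _ _ _ rfl,
              ih (n - 1) (by omega) (target - 1) maxDoubles (by omega) (by omega)]
          have hr1 : 1 ≤ n % 2 ^ d := by omega
          have hdivstep : (n - 1) / 2 ^ d = n / 2 ^ d := sub_one_div_eq n (2 ^ d) hpow hr1
          have hmodstep : (n - 1) % 2 ^ d = n % 2 ^ d - 1 := sub_one_mod_eq n (2 ^ d) hpow hr1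
          have hbc : PySem.Int.bitCount ((n % 2 ^ d : Nat) : Int)
              = PySem.Int.bitCount ((n % 2 ^ d - 1 : Nat) : Int) + 1 := bc_odd _ (by omega)
          simp only [g, log2_pred_odd n hn3 hnodd, ← hl, ← hdd,
            if_neg (by omega : ¬ n - 1 ≤ 1), if_neg (by omega : ¬ n ≤ 1),
            hmodstep, hdivstep]
          rw [hbc]
          push_cast
          omega
        · -- even step: target //= 2, maxDoubles -= 1
          have hnev : n % 2 = 0 := by omega
          have hfd : PySem.Int.floordiv target 2 = target / 2 :=
            PySem.Int.floordiv_eq_ediv_of_pos (by omega)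
          rw [hmod, if_neg hodd, hfd, minMovesLoop_acc (target / 2).toNat _ _ _ rfl,
              ih (n / 2) (by omega) (target / 2) (maxDoubles - 1) (by omega) (by omega)]
          by_cases h2 : n = 2
          · subst h2
            have hl1 : l = 1 := by rw [hl]; decide
            have hd : d = 1 := by omega
            have hd1' : min (max maxDoubles 0).toNat (Nat.log2 2) = 1 := by
              rw [← hl]; omega
            simp only [g, hd1', if_pos (by norm_num : (2:Nat) / 2 ≤ 1),
              if_neg (by norm_num : ¬ (2:Nat) ≤ 1)]
            norm_num
          · have hn4 : 4 ≤ n := by omega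
            have hlog2 : Nat.log2 (n / 2) = l - 1 := by rw [hl]; exact log2_half n hn2
            have hd' : min (max (maxDoubles - 1) 0).toNat (Nat.log2 (n / 2)) = d - 1 := by
              rw [hlog2]; omega
            simp only [g, hd', if_neg (by omega : ¬ n / 2 ≤ 1), if_neg (by omega : ¬ n ≤ 1),
              ← hl]
            have hpow2 : 2 ^ d = 2 * 2 ^ (d - 1) := by
              rw [← pow_succ']
              congr 1
              omega
            have hmodstep : n / 2 % 2 ^ (d - 1) = n % 2 ^ d / 2 := by
              rw [hpow2, ← Nat.mod_mul_right_div_self]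
            have hdivstep : n / 2 / 2 ^ (d - 1) = n / 2 ^ d := by
              rw [Nat.div_div_eq_div_mul, ← hpow2]
            have hbc : PySem.Int.bitCount ((n % 2 ^ d / 2 : Nat) : Int)
                = PySem.Int.bitCount ((n % 2 ^ d : Nat) : Int) := bc_even _ (by omega)
            simp only [← hdd, hmodstep, hdivstep, hbc]
            push_cast
            omega
      · -- no doubles left: loop exits, mo += target - 1
        simp only [hm, false_and, dite_false, if_pos ht]
        have hd0 : min (max maxDoubles 0).toNat (Nat.log2 n) = 0 := by omega
        simp only [g, hd0, if_neg (by omega : ¬ n ≤ 1), pow_zero, Nat.mod_one, Nat.div_one]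
        have hbc0 : PySem.Int.bitCount ((0 : Nat) : Int) = 0 := by decide
        rw [hbc0]
        omega
    · -- target ≤ 1: loop does not run, answer 0
      have hn1 : n ≤ 1 := by omega
      simp [ht, g, hn1]

-- B's port equals the closed form g (bridging Int bit operations to Nat arithmetic)
lemma alt_eq_g (target maxDoubles : Int) (h2 : 2 ≤ target) :
    minMoves_alt target maxDoubles = g target.toNat maxDoubles := by
  have hn2 : 2 ≤ target.toNat := by omega
  set n := target.toNat with hn
  have htn : target = (n : Int) := by omega
  -- bitLength = log2 + 1
  have hbl : PySem.Int.bitLength target = Nat.log2 n + 1 := by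
    have hne : target ≠ 0 := by omega
    have h1 := PySem.Int.two_pow_bitLength_le target hne
    have h2' := PySem.Int.lt_two_pow_bitLength target
    have habs : target.natAbs = n := by omega
    rw [habs] at h1 h2'
    have hbl1 : 1 ≤ PySem.Int.bitLength target := by
      by_contra hb
      have : PySem.Int.bitLength target = 0 := by omega
      rw [this] at h2'
      simp at h2'
      omega
    have := log2_eq n (PySem.Int.bitLength target - 1) h1 (by
      have : PySem.Int.bitLength target - 1 + 1 = PySem.Int.bitLength target := by omega
      rw [this]; exact h2')
    omega
  rw [minMoves_alt, if_neg (by omega : ¬ target ≤ 1), g, if_neg (by omega : ¬ n ≤ 1)]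
  simp only [hbl]
  have hdeq : (min (max maxDoubles 0) ((↑(Nat.log2 n + 1) : Int) - 1)).toNat
      = min (max maxDoubles 0).toNat (Nat.log2 n) := by omega
  rw [hdeq]
  set d := min (max maxDoubles 0).toNat (Nat.log2 n) with hdd
  have hshl : (1 <<< d : Nat) = 2 ^ d := by rw [Nat.shiftLeft_eq]; ring
  have hpowpos : 0 < 2 ^ d := Nat.two_pow_pos d
  have hband : PySem.Int.band target ((((1 <<< d : Nat) : Int)) - 1) = ((n % 2 ^ d : Nat) : Int) := by
    rw [hshl, PySem.Int.band_of_nonneg (by omega) (by omega)]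
    congr 1
    have h1 : (target.toNat) = n := rfl
    have h2'' : (((2 ^ d : Nat) : Int) - 1).toNat = 2 ^ d - 1 := by omega
    rw [h1, h2'', Nat.and_two_pow_sub_one_eq_mod]
  have hshr : target >>> d = ((n / 2 ^ d : Nat) : Int) := by
    rw [htn, show ((n : Int) >>> d) = ((n >>> d : Nat) : Int) from by simp,
        Nat.shiftRight_eq_div_pow]
  rw [hband, hshr]

-- ===== VERDICT (by name: the statement is the Claim_ definition above) =====
theorem minMoves_spec : Claim_equal_minMoves := by
  intro target maxDoubles _
  unfold Spec_minMoves minMoves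
  by_cases h : target ≤ 1
  · rw [minMovesLoop, minMoves_alt, if_pos h]
    have h1 : ¬ target > 1 := by omega
    simp [h1]
  · rw [alt_eq_g target maxDoubles (by omega),
        loop_eq_g target.toNat target maxDoubles rfl (by omega)]
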